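-- pv_equiv track=rewrite | github.com/kchaehyun/Algorithm-Study | programmers/42862/42862.py | solution
-- ===== SOURCE A (Python) =====
-- def solution(n, lost, reserve):
--     lost = set(lost)
--     reserve = set(reserve)
--     inter = lost & reserve
--     lost -= inter
--     reserve -= inter
--     for l in sorted(lost) :
--         if l-1 in reserve :
--             reserve.remove(l-1)
--             lost.remove(l)
--             continue
--         elif l+1 in reserve :
--             reserve.remove(l+1)
--             lost.remove(l)
--             continue
--
--     return n - len(lost)
-- ===== SOURCE B (Python) =====
-- def solution(n, lost, reserve):
--     ls = sorted(set(lost) - set(reserve))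
--     rs = sorted(set(reserve) - set(lost))
--     i = j = matched = 0
--     while i < len(ls) and j < len(rs):
--         if rs[j] < ls[i] - 1:
--             j += 1
--         elif rs[j] <= ls[i] + 1:
--             matched += 1
--             i += 1
--             j += 1
--         else:
--             i += 1
--     return n - (len(ls) - matched)
-- ===== Notes on version B (the rewrite author's own statement) =====
-- stated objective: alternative
-- what changed: Replaces A's loop that mutates two sets (membership test + remove per lost student) by a two-pointer merge over the two sorted deduplicated lists, counting matches with no set mutation.
import Mathlib
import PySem

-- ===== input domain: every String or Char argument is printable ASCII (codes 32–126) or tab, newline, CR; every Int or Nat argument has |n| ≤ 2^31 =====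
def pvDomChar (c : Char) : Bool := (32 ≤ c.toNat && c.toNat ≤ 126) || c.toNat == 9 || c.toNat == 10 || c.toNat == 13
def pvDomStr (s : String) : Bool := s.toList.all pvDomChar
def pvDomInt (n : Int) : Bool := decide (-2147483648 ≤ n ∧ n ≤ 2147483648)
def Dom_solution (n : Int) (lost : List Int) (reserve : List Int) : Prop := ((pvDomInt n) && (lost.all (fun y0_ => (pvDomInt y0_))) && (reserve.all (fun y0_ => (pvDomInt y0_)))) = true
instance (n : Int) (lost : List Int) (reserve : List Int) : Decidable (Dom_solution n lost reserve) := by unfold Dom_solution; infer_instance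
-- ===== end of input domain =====

-- B replaces A's set-mutating greedy loop by a two-pointer merge of the two sorted deduplicated lists (alternative structure, same cost).

-- ===== PORT A =====
-- `reserve.remove(l-1)` / `lost.remove(l)` run only when the element is present
-- (membership just checked; l comes from the snapshot of the distinct lost set),
-- so Python's set.remove never raises here and equals Set.discard.
def solution (n : Int) (lost : List Int) (reserve : List Int) : Int :=
  let lostS : PySem.Set Int := PySem.Set.ofList lost
  let reserveS : PySem.Set Int := PySem.Set.ofList reserve
  let inter : PySem.Set Int := PySem.Set.inter lostS reserveS
  let lostS : PySem.Set Int := PySem.Set.diff lostS inter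
  let reserveS : PySem.Set Int := PySem.Set.diff reserveS inter
  let st :=
    (PySem.List.sorted lostS (fun x => x) false).foldl
      (fun (st : PySem.Set Int × PySem.Set Int) l =>
        if PySem.Set.contains st.2 (l - 1) then
          (PySem.Set.discard st.1 l, PySem.Set.discard st.2 (l - 1))
        else if PySem.Set.contains st.2 (l + 1) then
          (PySem.Set.discard st.1 l, PySem.Set.discard st.2 (l + 1))
        else st)
      (lostS, reserveS)
  n - PySem.Set.len st.1

-- ===== PORT B =====
-- two-pointer merge over the sorted lists (Source B's while loop, as structural recursion)
def twoPtr : List Int → List Int → Int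
  | [], _ => 0
  | _ :: _, [] => 0
  | l :: ls, r :: rs =>
    if r < l - 1 then twoPtr (l :: ls) rs
    else if r ≤ l + 1 then 1 + twoPtr ls rs
    else twoPtr ls (r :: rs)
  termination_by ls rs => ls.length + rs.length

def solution_alt (n : Int) (lost : List Int) (reserve : List Int) : Int :=
  let ls := PySem.List.sorted
    (PySem.Set.diff (PySem.Set.ofList lost) (PySem.Set.ofList reserve)) (fun x => x) false
  let rs := PySem.List.sorted
    (PySem.Set.diff (PySem.Set.ofList reserve) (PySem.Set.ofList lost)) (fun x => x) false
  n - ((ls.length : Int) - twoPtr ls rs)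

-- ===== PRECONDITION & SPEC =====
def Spec_solution (n : Int) (lost : List Int) (reserve : List Int) (out : Int) : Prop := out = solution_alt n lost reserve
instance (n : Int) (lost : List Int) (reserve : List Int) (out : Int) : Decidable (Spec_solution n lost reserve out) := by unfold Spec_solution; infer_instance

-- ===== CLAIM (what is proved, stated in full; the proofs are below) =====
def Claim_equal_solution : Prop := ∀ (n : Int) (lost : List Int) (reserve : List Int), Dom_solution n lost reserve → Spec_solution n lost reserve (solution n lost reserve)

-- ===== LEMMAS AND PROOFS =====

-- A's loop distilled to the matched count; the reserve set is any list used only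
-- through membership and discard.
def pvAcount : List Int → List Int → Int
  | [], _ => 0
  | l :: ls, R =>
    if (l - 1) ∈ R then 1 + pvAcount ls (PySem.Set.discard R (l - 1))
    else if (l + 1) ∈ R then 1 + pvAcount ls (PySem.Set.discard R (l + 1))
    else pvAcount ls R

theorem pvAcount_nilR (L : List Int) : pvAcount L [] = 0 := by
  induction L with
  | nil => rfl
  | cons l ls ih => simp [pvAcount, ih]

theorem pvAcount_congr (L : List Int) : ∀ (R R' : List Int),
    (∀ x : Int, x ∈ R ↔ x ∈ R') → pvAcount L R = pvAcount L R' := by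
  induction L with
  | nil => intro R R' h; rfl
  | cons l ls ih =>
    intro R R' h
    simp only [pvAcount, h (l - 1), h (l + 1)]
    by_cases h1 : (l - 1) ∈ R'
    · simp only [if_pos h1]
      rw [ih (PySem.Set.discard R (l - 1)) (PySem.Set.discard R' (l - 1))
            (fun x => by simp [PySem.Set.mem_discard, h x])]
    · by_cases h2 : (l + 1) ∈ R'
      · simp only [if_neg h1, if_pos h2]
        rw [ih (PySem.Set.discard R (l + 1)) (PySem.Set.discard R' (l + 1))
              (fun x => by simp [PySem.Set.mem_discard, h x])]
      · simp only [if_neg h1, if_neg h2]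
        exact ih _ _ h

theorem pvAcount_drop (L : List Int) : ∀ (r : Int) (rs : List Int),
    (∀ l ∈ L, r ≠ l - 1 ∧ r ≠ l + 1) → pvAcount L (r :: rs) = pvAcount L rs := by
  induction L with
  | nil => intro r rs _; rfl
  | cons l ls ih =>
    intro r rs h
    have hl := h l (List.mem_cons_self ..)
    have htail : ∀ l' ∈ ls, r ≠ l' - 1 ∧ r ≠ l' + 1 := fun l' hl' => h l' (List.mem_cons_of_mem _ hl')
    simp only [pvAcount, List.mem_cons]
    by_cases h1 : (l - 1) ∈ rs
    · rw [if_pos (Or.inr h1), if_pos h1]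
      have : pvAcount ls (PySem.Set.discard (r :: rs) (l - 1))
           = pvAcount ls (r :: PySem.Set.discard rs (l - 1)) := by
        apply pvAcount_congr
        intro x
        simp only [PySem.Set.mem_discard, List.mem_cons]
        constructor
        · rintro ⟨hx | hx, hne⟩
          · exact Or.inl hx
          · exact Or.inr ⟨hx, hne⟩
        · rintro (hx | ⟨hx, hne⟩)
          · exact ⟨Or.inl hx, by rw [hx]; exact hl.1⟩
          · exact ⟨Or.inr hx, hne⟩
      rw [this, ih _ _ htail]
    · have hnotc : ¬ (l - 1 = r ∨ (l - 1) ∈ rs) := by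
        rintro (hc | hc)
        · exact hl.1 hc.symm
        · exact h1 hc
      rw [if_neg hnotc, if_neg h1]
      by_cases h2 : (l + 1) ∈ rs
      · rw [if_pos (Or.inr h2), if_pos h2]
        have : pvAcount ls (PySem.Set.discard (r :: rs) (l + 1))
             = pvAcount ls (r :: PySem.Set.discard rs (l + 1)) := by
          apply pvAcount_congr
          intro x
          simp only [PySem.Set.mem_discard, List.mem_cons]
          constructor
          · rintro ⟨hx | hx, hne⟩
            · exact Or.inl hx
            · exact Or.inr ⟨hx, hne⟩
          · rintro (hx | ⟨hx, hne⟩)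
            · exact ⟨Or.inl hx, by rw [hx]; exact hl.2⟩
            · exact ⟨Or.inr hx, hne⟩
        rw [this, ih _ _ htail]
      · have hnotc2 : ¬ (l + 1 = r ∨ (l + 1) ∈ rs) := by
          rintro (hc | hc)
          · exact hl.2 hc.symm
          · exact h2 hc
        rw [if_neg hnotc2, if_neg h2]
        exact ih _ _ htail

-- the greedy count of A equals the two-pointer count of B on sorted disjoint lists
theorem pvAcount_eq_twoPtr (L R : List Int) (hL : L.Pairwise (· < ·))
    (hR : R.Pairwise (· < ·)) (hdisj : ∀ x ∈ L, x ∉ R) :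
    pvAcount L R = twoPtr L R := by
  induction L, R using twoPtr.induct with
  | case1 R => rw [pvAcount, twoPtr]
  | case2 l ls => rw [pvAcount_nilR, twoPtr]
  | case3 l ls r rs hlt ih =>
    rw [twoPtr, if_pos hlt]
    rw [pvAcount_drop (l :: ls) r rs (by
      intro l' hl'
      have hll' : l ≤ l' := by
        rcases List.mem_cons.mp hl' with h | h
        · omega
        · exact le_of_lt (List.rel_of_pairwise_cons hL h)
      omega)]
    exact ih hL (List.Pairwise.of_cons hR) (fun x hx hx' => hdisj x hx (List.mem_cons_of_mem _ hx'))
  | case4 l ls r rs hlt hle ih =>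
    rw [twoPtr, if_neg hlt, if_pos hle]
    have hlr : l ≠ r := fun h => hdisj l (List.mem_cons_self ..) (h ▸ List.mem_cons_self ..)
    have hrs_gt : ∀ x ∈ rs, r < x := fun x hx => List.rel_of_pairwise_cons hR hx
    have hcongr : pvAcount ls (PySem.Set.discard (r :: rs) r) = pvAcount ls rs := by
      apply pvAcount_congr
      intro x
      simp only [PySem.Set.mem_discard, List.mem_cons]
      constructor
      · rintro ⟨hx | hx, hne⟩
        · exact absurd hx hne
        · exact hx
      · intro hx
        exact ⟨Or.inr hx, fun h => lt_irrefl r (h ▸ hrs_gt x hx)⟩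
    have hih := ih (List.Pairwise.of_cons hL) (List.Pairwise.of_cons hR)
      (fun x hx hx' => hdisj x (List.mem_cons_of_mem _ hx) (List.mem_cons_of_mem _ hx'))
    rcases (by omega : r = l - 1 ∨ r = l + 1) with hr | hr
    · rw [pvAcount, if_pos (by rw [hr]; exact List.mem_cons_self ..)]
      rw [hr] at hcongr ⊢
      rw [hcongr, hih]
    · have hno : (l - 1) ∉ (r :: rs) := by
        intro hx
        rcases List.mem_cons.mp hx with h | h
        · omega
        · have := hrs_gt _ h; omega
      rw [pvAcount, if_neg hno, if_pos (by rw [hr]; exact List.mem_cons_self ..)]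
      rw [hr] at hcongr ⊢
      rw [hcongr, hih]
  | case5 l ls r rs hlt hle ih =>
    rw [twoPtr, if_neg hlt, if_neg hle]
    have hrs_ge : ∀ x ∈ (r :: rs), r ≤ x := by
      intro x hx
      rcases List.mem_cons.mp hx with h | h
      · omega
      · exact le_of_lt (List.rel_of_pairwise_cons hR h)
    have h1 : (l - 1) ∉ (r :: rs) := fun hx => by have := hrs_ge _ hx; omega
    have h2 : (l + 1) ∉ (r :: rs) := fun hx => by have := hrs_ge _ hx; omega
    rw [pvAcount, if_neg h1, if_neg h2]
    exact ih (List.Pairwise.of_cons hL) hR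
      (fun x hx => hdisj x (List.mem_cons_of_mem _ hx))

-- discarding a present element of a duplicate-free list shrinks it by one
theorem pvLenDiscard (s : List Int) (l : Int) (hs : s.Nodup) (hl : l ∈ s) :
    ((PySem.Set.discard s l).length : Int) = (s.length : Int) - 1 := by
  have hnd : (l :: PySem.Set.discard s l).Nodup := by
    rw [List.nodup_cons]
    exact ⟨fun h => ((PySem.Set.mem_discard _ _ _).mp h).2 rfl, PySem.Set.nodup_discard _ _ hs⟩
  have hperm : s.Perm (l :: PySem.Set.discard s l) := by
    rw [List.perm_ext_iff_of_nodup hs hnd]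
    intro x
    simp only [List.mem_cons, PySem.Set.mem_discard]
    constructor
    · intro hx
      by_cases hxl : x = l
      · exact Or.inl hxl
      · exact Or.inr ⟨hx, hxl⟩
    · rintro (hx | ⟨hx, _⟩)
      · exact hx ▸ hl
      · exact hx
  have := hperm.length_eq
  simp only [List.length_cons] at this
  omega

-- size of the remaining lost set after A's fold
theorem pvFold (L : List Int) : ∀ (lostS R : List Int), L.Nodup → lostS.Nodup →
    (∀ l ∈ L, l ∈ lostS) →
    ((L.foldl (fun (st : PySem.Set Int × PySem.Set Int) l =>
        if PySem.Set.contains st.2 (l - 1) then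
          (PySem.Set.discard st.1 l, PySem.Set.discard st.2 (l - 1))
        else if PySem.Set.contains st.2 (l + 1) then
          (PySem.Set.discard st.1 l, PySem.Set.discard st.2 (l + 1))
        else st)
      (lostS, R)).1.length : Int) = (lostS.length : Int) - pvAcount L R := by
  induction L with
  | nil => intro lostS R _ _ _; simp [pvAcount]
  | cons l ls ih =>
    intro lostS R hL hS hsub
    obtain ⟨hlnotin, hlsnd⟩ := List.nodup_cons.mp hL
    have hsubtail : ∀ l' ∈ ls, l' ∈ PySem.Set.discard lostS l := by
      intro l' hl'
      exact (PySem.Set.mem_discard _ _ _).mpr ⟨hsub l' (List.mem_cons_of_mem _ hl'),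
        fun h => hlnotin (h ▸ hl')⟩
    simp only [List.foldl_cons]
    by_cases h1 : (l - 1) ∈ R
    · rw [if_pos ((PySem.Set.contains_iff _ _).mpr h1)]
      rw [ih (PySem.Set.discard lostS l) (PySem.Set.discard R (l - 1)) hlsnd
            (PySem.Set.nodup_discard _ _ hS) hsubtail]
      rw [pvLenDiscard lostS l hS (hsub l (List.mem_cons_self ..))]
      rw [pvAcount, if_pos h1]
      omega
    · rw [if_neg (fun h => h1 ((PySem.Set.contains_iff _ _).mp h))]
      by_cases h2 : (l + 1) ∈ R
      · rw [if_pos ((PySem.Set.contains_iff _ _).mpr h2)]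
        rw [ih (PySem.Set.discard lostS l) (PySem.Set.discard R (l + 1)) hlsnd
              (PySem.Set.nodup_discard _ _ hS) hsubtail]
        rw [pvLenDiscard lostS l hS (hsub l (List.mem_cons_self ..))]
        rw [pvAcount, if_neg h1, if_pos h2]
        omega
      · rw [if_neg (fun h => h2 ((PySem.Set.contains_iff _ _).mp h))]
        rw [ih lostS R hlsnd hS (fun l' hl' => hsub l' (List.mem_cons_of_mem _ hl'))]
        rw [pvAcount, if_neg h1, if_neg h2]

-- sorting a duplicate-free list gives a strictly increasing list
theorem pvSortedLt (xs : List Int) (h : xs.Nodup) :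
    (PySem.List.sorted xs (fun x => x) false).Pairwise (· < ·) := by
  have h1 : (PySem.List.sorted xs (fun x => x) false).Pairwise
      (fun a b => (fun x => x) a ≤ (fun x => x) b) := PySem.List.sorted_pairwise xs (fun x => x)
  have h2 : (PySem.List.sorted xs (fun x => x) false).Nodup :=
    (PySem.List.sorted_perm xs (fun x => x) false).symm.nodup h
  exact (h1.and h2).imp (fun hab => lt_of_le_of_ne hab.1 hab.2)

-- ===== VERDICT (by name: the statement is the Claim_ definition above) =====
theorem solution_spec : Claim_equal_solution := by
  intro n lost reserve _
  unfold Spec_solution solution solution_alt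
  simp only [PySem.Set.len]
  set sL := PySem.Set.ofList lost with hsLdef
  set sR := PySem.Set.ofList reserve with hsRdef
  set dL := sL.diff (sL.inter sR) with hdLdef
  set dR := sR.diff (sL.inter sR) with hdRdef
  set dL' := sL.diff sR with hdL'def
  set dR' := sR.diff sL with hdR'def
  have hndsL : sL.Nodup := PySem.Set.nodup_ofList lost
  have hndsR : sR.Nodup := PySem.Set.nodup_ofList reserve
  have hnddL : dL.Nodup := PySem.Set.nodup_diff _ _ hndsL
  have hnddR : dR.Nodup := PySem.Set.nodup_diff _ _ hndsR
  have hnddL' : dL'.Nodup := PySem.Set.nodup_diff _ _ hndsL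
  have hnddR' : dR'.Nodup := PySem.Set.nodup_diff _ _ hndsR
  have hmemdL : ∀ x : Int, x ∈ dL ↔ x ∈ lost ∧ x ∉ reserve := by
    intro x
    simp only [hdLdef, hsLdef, hsRdef, PySem.Set.mem_diff, PySem.Set.mem_inter,
      PySem.Set.mem_ofList]
    tauto
  have hmemdL' : ∀ x : Int, x ∈ dL' ↔ x ∈ lost ∧ x ∉ reserve := by
    intro x
    simp only [hdL'def, hsLdef, hsRdef, PySem.Set.mem_diff, PySem.Set.mem_ofList]
  have hmemdR : ∀ x : Int, x ∈ dR ↔ x ∈ reserve ∧ x ∉ lost := by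
    intro x
    simp only [hdRdef, hsLdef, hsRdef, PySem.Set.mem_diff, PySem.Set.mem_inter,
      PySem.Set.mem_ofList]
    tauto
  have hmemdR' : ∀ x : Int, x ∈ dR' ↔ x ∈ reserve ∧ x ∉ lost := by
    intro x
    simp only [hdR'def, hsLdef, hsRdef, PySem.Set.mem_diff, PySem.Set.mem_ofList]
  set lsB := PySem.List.sorted dL' (fun x => x) false with hlsBdef
  set rsB := PySem.List.sorted dR' (fun x => x) false with hrsBdef
  have hpermdiffs : dL'.Perm dL := (List.perm_ext_iff_of_nodup hnddL' hnddL).mpr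
    (fun x => by rw [hmemdL' x, hmemdL x])
  have hlsBperm : lsB.Perm dL' := PySem.List.sorted_perm dL' (fun x => x) false
  have hlsBlt : lsB.Pairwise (· < ·) := pvSortedLt dL' hnddL'
  have hrsBlt : rsB.Pairwise (· < ·) := pvSortedLt dR' hnddR'
  have hLAeq : PySem.List.sorted dL (fun x => x) false = lsB :=
    PySem.List.sorted_eq_of_perm_of_pairwise_lt dL lsB (fun x => x) (hlsBperm.trans hpermdiffs) hlsBlt
  rw [hLAeq]
  have hmemlsB : ∀ x : Int, x ∈ lsB ↔ x ∈ lost ∧ x ∉ reserve := by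
    intro x
    rw [← hmemdL' x]
    exact hlsBperm.mem_iff
  have hmemrsB : ∀ x : Int, x ∈ rsB ↔ x ∈ reserve ∧ x ∉ lost := by
    intro x
    rw [← hmemdR' x]
    exact (PySem.List.sorted_perm dR' (fun x => x) false).mem_iff
  rw [pvFold lsB dL dR (hlsBperm.symm.nodup hnddL') hnddL
    (fun l hl => (hmemdL l).mpr ((hmemlsB l).mp hl))]
  have hcountR : pvAcount lsB dR = pvAcount lsB rsB :=
    pvAcount_congr lsB dR rsB (fun x => by rw [hmemdR x, hmemrsB x])
  have hmain : pvAcount lsB rsB = twoPtr lsB rsB :=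
    pvAcount_eq_twoPtr lsB rsB hlsBlt hrsBlt
      (fun x hx hx' => ((hmemrsB x).mp hx').2 ((hmemlsB x).mp hx).1)
  have hlen : (dL.length : Int) = (lsB.length : Int) := by
    rw [(hlsBperm.trans hpermdiffs).length_eq]
  rw [hcountR, hmain, hlen]
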